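-- pv_equiv track=rewrite | github.com/tordhaflan/AIProg | Assignment2/Ledge.py | child_actions
-- ===== SOURCE A (Python) =====
-- def child_actions(state):
--     """ produces a list of possible actions from current state
--
--     :param state: list, current board
--     :return: A list of moves
--     """
--     actions = []
--     if state[0] > 0:
--         actions.append((0, 0))
--
--     c = 0
--     for i in range(len(state) - 1, -1, -1):
--         if state[i] > 0:
--             c = i
--         elif c > 0 and state[i] == 0:
--             actions.append((c, i))
--
--     return actions
-- ===== SOURCE B (Python) =====
-- def child_actions(state):
--     """ produces a list of possible actions from current state
--
--     :param state: list, current board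
--     :return: A list of moves
--     """
--     coins = [i for i, v in enumerate(state) if v > 0]
--     actions = [(0, 0)] if state[0] > 0 else []
--     for idx in range(len(coins) - 1, -1, -1):
--         c = coins[idx]
--         lower = coins[idx - 1] if idx > 0 else -1
--         for i in range(c - 1, lower, -1):
--             if state[i] == 0:
--                 actions.append((c, i))
--     return actions
-- ===== Notes on version B (the rewrite author's own statement) =====
-- stated objective: alternative
-- what changed: B first builds the list of coin indices, then emits the header move and, per pair of consecutive coins (top-down), the empty cells in the gap between them, instead of A's single right-to-left scan with a running nearest-coin pointer.
import Mathlib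
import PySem

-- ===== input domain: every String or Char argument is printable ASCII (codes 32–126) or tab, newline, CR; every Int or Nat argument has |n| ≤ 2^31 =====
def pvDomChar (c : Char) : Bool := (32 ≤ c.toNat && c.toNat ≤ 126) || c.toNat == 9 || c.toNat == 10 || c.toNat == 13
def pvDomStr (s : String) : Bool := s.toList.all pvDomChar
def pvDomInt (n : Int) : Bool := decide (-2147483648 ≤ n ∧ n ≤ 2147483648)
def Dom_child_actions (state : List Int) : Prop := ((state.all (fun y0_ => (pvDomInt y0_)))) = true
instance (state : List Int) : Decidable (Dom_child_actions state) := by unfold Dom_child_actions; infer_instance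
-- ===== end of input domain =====

-- B replaces A's single right-to-left running-pointer scan by a precomputed list of coin
-- indices plus a nested gap pass between consecutive coins (alternative decomposition, same cost).

-- ===== PORT A =====
def child_actions (state : List Int) : List (Int × Int) :=
  let actions : List (Int × Int) := if PySem.List.pyGetD state 0 0 > 0 then [(0, 0)] else []
  let r := (PySem.List.pyRange (PySem.List.len state - 1) (-1) (-1)).foldl
    (fun (p : List (Int × Int) × Int) i =>
      if PySem.List.pyGetD state i 0 > 0 then (p.1, i)
      else if p.2 > 0 ∧ PySem.List.pyGetD state i 0 = 0 then (p.1 ++ [(p.2, i)], p.2)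
      else p)
    (actions, 0)
  r.1

-- ===== PORT B =====
def child_actions_alt (state : List Int) : List (Int × Int) :=
  let coins : List Int := ((PySem.List.enumerate state 0).filter (fun p => decide (p.2 > 0))).map Prod.fst
  let actions : List (Int × Int) := if PySem.List.pyGetD state 0 0 > 0 then [(0, 0)] else []
  (PySem.List.pyRange (PySem.List.len coins - 1) (-1) (-1)).foldl
    (fun acc idx =>
      let c := PySem.List.pyGetD coins idx 0
      let lower := if idx > 0 then PySem.List.pyGetD coins (idx - 1) 0 else -1
      (PySem.List.pyRange (c - 1) lower (-1)).foldl
        (fun acc2 i => if PySem.List.pyGetD state i 0 = 0 then acc2 ++ [(c, i)] else acc2)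
        acc)
    actions

-- ===== PRECONDITION & SPEC =====
-- Pre_ excludes only the empty list, on which Python A (and B) raises IndexError reading the first element.
def Pre_child_actions (state : List Int) : Prop := state ≠ []
instance (state : List Int) : Decidable (Pre_child_actions state) := by unfold Pre_child_actions; infer_instance
def pvWitness_child_actions : List Int := [1, 0, 2]

def Spec_child_actions (state : List Int) (out : List (Int × Int)) : Prop := out = child_actions_alt state
instance (state : List Int) (out : List (Int × Int)) : Decidable (Spec_child_actions state out) := by unfold Spec_child_actions; infer_instance

-- ===== CLAIM (what is proved, stated in full; the proofs are below) =====
def Claim_equal_child_actions : Prop := ∀ (state : List Int), Dom_child_actions state → Pre_child_actions state → Spec_child_actions state (child_actions state)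

-- ===== LEMMAS AND PROOFS =====

-- proof-only helpers
-- the coin-index list B computes
def pvCoins (state : List Int) : List Int :=
  ((PySem.List.enumerate state 0).filter (fun p => decide (p.2 > 0))).map Prod.fst

-- pairs (c, i) for i from hi down to lo+1 at empty cells
def pvGap (state : List Int) (c lo hi : Int) : List (Int × Int) :=
  ((PySem.List.pyRange hi lo (-1)).filter (fun i => decide (PySem.List.pyGetD state i 0 = 0))).map (fun i => (c, i))

-- emission down a descending coin list, carrying the coin above and the current top index
def pvE (state : List Int) : List Int → Int → Int → List (Int × Int)
  | [], hi, c => if c > 0 then pvGap state c (-1) hi else []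
  | d :: rest, hi, c => (if c > 0 then pvGap state c d hi else []) ++ pvE state rest (d - 1) d

-- A's scan, as a structural recursion on the number of remaining indices
def pvOutA (state : List Int) : Nat → Int → List (Int × Int)
  | 0, _ => []
  | m + 1, c =>
    if PySem.List.pyGetD state (m : Int) 0 > 0 then pvOutA state m (m : Int)
    else if c > 0 ∧ PySem.List.pyGetD state (m : Int) 0 = 0 then (c, (m : Int)) :: pvOutA state m c
    else pvOutA state m c

-- B's per-index gap contribution
def pvG (state : List Int) (idx : Int) : List (Int × Int) :=
  pvGap state (PySem.List.pyGetD (pvCoins state) idx 0)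
    (if idx > 0 then PySem.List.pyGetD (pvCoins state) (idx - 1) 0 else -1)
    (PySem.List.pyGetD (pvCoins state) idx 0 - 1)

lemma pvCoins_pairwise (state : List Int) : (pvCoins state).Pairwise (· < ·) := by
  have h := PySem.List.pairwise_lt_enumerate (xs := state) (s := 0)
  have h2 := h.filter (fun p => decide (p.2 > 0))
  unfold pvCoins
  exact (List.pairwise_map.mpr (h2.imp (fun hpq => hpq)))

lemma pvCoins_mem (state : List Int) (j : Int) :
    j ∈ pvCoins state ↔ ∃ k : Nat, k < state.length ∧ j = (k : Int) ∧ 0 < state.getD k 0 := by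
  unfold pvCoins
  simp only [List.mem_map, List.mem_filter, PySem.List.mem_enumerate_iff, decide_eq_true_eq]
  constructor
  · rintro ⟨p, ⟨⟨k, hk, hp⟩, hpos⟩, hj⟩
    subst hp
    refine ⟨k, hk, ?_, ?_⟩
    · simpa using hj.symm
    · simpa [List.getD_eq_getElem?_getD, hk] using hpos
  · rintro ⟨k, hk, rfl, hpos⟩
    refine ⟨((k : Int), state[k]), ⟨⟨k, hk, by simp⟩, ?_⟩, rfl⟩
    simpa [List.getD_eq_getElem?_getD, hk] using hpos

lemma pvCoins_nonneg (state : List Int) : ∀ j ∈ pvCoins state, 0 ≤ j := by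
  intro j hj
  obtain ⟨k, _, rfl, _⟩ := (pvCoins_mem state j).mp hj
  positivity

lemma pvGap_drop (state : List Int) (c lo t : Int)
    (hne : PySem.List.pyGetD state t 0 ≠ 0) :
    pvGap state c lo t = pvGap state c lo (t - 1) := by
  unfold pvGap
  by_cases h : lo < t
  · rw [PySem.List.pyRange_neg_one_cons h]
    simp [hne]
  · rw [PySem.List.pyRange_neg_one_eq_nil (by omega), PySem.List.pyRange_neg_one_eq_nil (by omega)]

lemma pvGap_cons (state : List Int) (c lo t : Int) (hlo : lo < t)
    (h0 : PySem.List.pyGetD state t 0 = 0) :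
    pvGap state c lo t = (c, t) :: pvGap state c lo (t - 1) := by
  unfold pvGap
  rw [PySem.List.pyRange_neg_one_cons hlo]
  simp [h0]

lemma pvE_drop (state : List Int) (cs : List Int) (t c : Int)
    (h : c > 0 → PySem.List.pyGetD state t 0 ≠ 0) :
    pvE state cs t c = pvE state cs (t - 1) c := by
  cases cs with
  | nil =>
      simp only [pvE]
      by_cases hc : c > 0
      · simp only [if_pos hc, pvGap_drop state c (-1) t (h hc)]
      · simp [hc]
  | cons d rest =>
      simp only [pvE]
      by_cases hc : c > 0
      · simp only [if_pos hc, pvGap_drop state c d t (h hc)]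
      · simp [hc]

lemma pvE_top (state : List Int) (cs : List Int) (t c : Int) (ht : -1 < t)
    (hc : c > 0) (h0 : PySem.List.pyGetD state t 0 = 0)
    (hgt : ∀ d ∈ cs, d < t) :
    pvE state cs t c = (c, t) :: pvE state cs (t - 1) c := by
  cases cs with
  | nil =>
      simp only [pvE, if_pos hc]
      rw [pvGap_cons state c (-1) t ht h0]
  | cons d rest =>
      simp only [pvE, if_pos hc]
      rw [pvGap_cons state c d t (hgt d (List.mem_cons_self ..)) h0]
      simp

lemma pvFilter_lt_succ_mem (l : List Int) (m : Nat) (hp : l.Pairwise (· < ·)) (hm : (m : Int) ∈ l) :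
    l.filter (fun j => decide (j < (m : Int) + 1)) = l.filter (fun j => decide (j < (m : Int))) ++ [(m : Int)] := by
  induction l with
  | nil => simp at hm
  | cons x t ih =>
      have hpt := hp.of_cons
      have hrel : ∀ j ∈ t, x < j := fun j hj => List.rel_of_pairwise_cons hp hj
      by_cases hx : x = (m : Int)
      · subst hx
        have h2 : t.filter (fun j => decide (j < (m : Int))) = [] :=
          List.filter_eq_nil_iff.mpr (fun j hj => by have := hrel j hj; simp; omega)
        simp [h2]
        exact hrel
      · have hmt : (m : Int) ∈ t := by
          rcases List.mem_cons.mp hm with h | h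
          · exact absurd h.symm hx
          · exact h
        have heq : (decide (x < (m : Int) + 1)) = (decide (x < (m : Int))) := by
          have : x < (m:Int) + 1 ↔ x < (m:Int) := by omega
          simp [this]
        simp only [List.filter_cons, heq, ih hpt hmt]
        split <;> simp

lemma pvFilter_lt_succ_not_mem (l : List Int) (m : Nat) (hm : (m : Int) ∉ l) :
    l.filter (fun j => decide (j < (m : Int) + 1)) = l.filter (fun j => decide (j < (m : Int))) := by
  apply List.filter_congr
  intro j hj
  have : j ≠ (m : Int) := fun h => hm (h ▸ hj)
  have : j < (m:Int) + 1 ↔ j < (m:Int) := by omega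
  simp [this]

lemma pvA_fold (state : List Int) : ∀ (m : Nat) (acc : List (Int × Int)) (c : Int),
    ((PySem.List.pyRange ((m : Int) - 1) (-1) (-1)).foldl
      (fun (p : List (Int × Int) × Int) i =>
        if PySem.List.pyGetD state i 0 > 0 then (p.1, i)
        else if p.2 > 0 ∧ PySem.List.pyGetD state i 0 = 0 then (p.1 ++ [(p.2, i)], p.2)
        else p) (acc, c)).1 = acc ++ pvOutA state m c := by
  intro m
  induction m with
  | zero => intro acc c; rw [PySem.List.pyRange_neg_one_eq_nil (by omega)]; simp [pvOutA]
  | succ m ih =>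
      intro acc c
      have hcast : ((m + 1 : Nat) : Int) - 1 = (m : Int) := by push_cast; ring
      rw [hcast, PySem.List.pyRange_neg_one_cons (by omega), List.foldl_cons]
      simp only [pvOutA]
      split_ifs with h1 h2
      · rw [ih acc (m : Int)]
      · simp only [ih (acc ++ [(c, (m:Int))]) c, List.append_assoc, List.singleton_append]
      · rw [ih acc c]

lemma pvA_E (state : List Int) : ∀ (m : Nat), m ≤ state.length → ∀ (c : Int),
    pvOutA state m c =
      pvE state (((pvCoins state).filter (fun j => decide (j < (m : Int)))).reverse) ((m : Int) - 1) c := by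
  intro m
  induction m with
  | zero =>
      intro _ c
      have hf : (pvCoins state).filter (fun j => decide (j < (0 : Int))) = [] :=
        List.filter_eq_nil_iff.mpr (fun j hj => by have := pvCoins_nonneg state j hj; simp; omega)
      simp only [Nat.cast_zero, hf, List.reverse_nil, pvOutA, pvE]
      unfold pvGap
      rw [PySem.List.pyRange_neg_one_eq_nil (by omega)]
      simp
  | succ m ih =>
      intro hle c
      have hm : m < state.length := by omega
      have ihm := ih (by omega)
      have hgetD : PySem.List.pyGetD state ((m : Nat) : Int) 0 = state[m] := by
        simp [PySem.List.pyGetD_natCast, List.getD_eq_getElem?_getD, hm]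
      have hmem : ((m : Int) ∈ pvCoins state) ↔ 0 < state[m] := by
        rw [pvCoins_mem]
        constructor
        · rintro ⟨k, hk, hkm, hpos⟩
          have : k = m := by exact_mod_cast hkm.symm
          subst this
          simpa [List.getD_eq_getElem?_getD, hk] using hpos
        · intro hpos
          exact ⟨m, hm, rfl, by simpa [List.getD_eq_getElem?_getD, hm] using hpos⟩
      have hcast : ((m + 1 : Nat) : Int) = (m : Int) + 1 := by push_cast; ring
      have hcast1 : ((m + 1 : Nat) : Int) - 1 = (m : Int) := by push_cast; ring
      have hred : (m : Int) + 1 - 1 = (m : Int) := by ring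
      simp only [pvOutA, hcast, hred]
      split_ifs with h1 h2
      · -- coin at m
        have hin : (m : Int) ∈ pvCoins state := hmem.mpr (by rw [hgetD] at h1; omega)
        rw [pvFilter_lt_succ_mem (pvCoins state) m (pvCoins_pairwise state) hin]
        rw [List.reverse_append, List.reverse_singleton, List.singleton_append]
        simp only [pvE]
        have hgap : pvGap state c (m : Int) (m : Int) = [] := by
          unfold pvGap
          rw [PySem.List.pyRange_neg_one_eq_nil (by omega)]
          simp
        rw [ihm (m : Int), hgap]
        split <;> simp
      · -- empty at m, carry positive
        have hnotin : (m : Int) ∉ pvCoins state := fun h => by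
          have := hmem.mp h; rw [hgetD] at h1; omega
        rw [pvFilter_lt_succ_not_mem (pvCoins state) m hnotin]
        rw [pvE_top state _ (m : Int) c (by omega) h2.1 h2.2]
        · rw [ihm c]
        · intro d hd
          have hd2 := List.mem_reverse.mp hd
          have := (List.mem_filter.mp hd2).2
          simpa using this
      · -- skip m
        have hnotin : (m : Int) ∉ pvCoins state := fun h => by
          have := hmem.mp h; rw [hgetD] at h1; omega
        rw [pvFilter_lt_succ_not_mem (pvCoins state) m hnotin]
        rw [pvE_drop state _ (m : Int) c (fun hc => by
          intro h0
          exact h2 ⟨hc, h0⟩)]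
        rw [ihm c]


lemma pvB_flatMap (state : List Int) :
    child_actions_alt state =
      (if PySem.List.pyGetD state 0 0 > 0 then [((0 : Int), (0 : Int))] else []) ++
        (PySem.List.pyRange (PySem.List.len (pvCoins state) - 1) (-1) (-1)).flatMap (pvG state) := by
  unfold child_actions_alt
  dsimp only
  rw [show (((PySem.List.enumerate state 0).filter (fun p => decide (p.2 > 0))).map Prod.fst) = pvCoins state from rfl]
  have h : ∀ (acc : List (Int × Int)), ∀ idx ∈ PySem.List.pyRange (PySem.List.len (pvCoins state) - 1) (-1) (-1),
      (PySem.List.pyRange (PySem.List.pyGetD (pvCoins state) idx 0 - 1)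
          (if idx > 0 then PySem.List.pyGetD (pvCoins state) (idx - 1) 0 else -1) (-1)).foldl
        (fun acc2 i =>
          if PySem.List.pyGetD state i 0 = 0 then acc2 ++ [(PySem.List.pyGetD (pvCoins state) idx 0, i)] else acc2)
        acc = acc ++ pvG state idx := by
    intro acc idx _
    rw [PySem.List.foldl_append_ite (p := fun i => PySem.List.pyGetD state i 0 = 0)
      (f := fun i => (PySem.List.pyGetD (pvCoins state) idx 0, i))]
    rfl
  rw [PySem.List.foldl_congr_mem _ _ (fun acc idx => acc ++ pvG state idx) _ h,
    PySem.List.foldl_append_eq_flatMap]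


lemma pvB_E (state : List Int) : ∀ (m : Nat), m ≤ (pvCoins state).length → ∀ (hi c : Int),
    pvE state (((pvCoins state).take m).reverse) hi c =
      (if c > 0 then
          pvGap state c (if 0 < m then PySem.List.pyGetD (pvCoins state) ((m : Int) - 1) 0 else -1) hi
        else []) ++
        (PySem.List.pyRange ((m : Int) - 1) (-1) (-1)).flatMap (pvG state) := by
  intro m
  induction m with
  | zero =>
      intro _ hi c
      rw [PySem.List.pyRange_neg_one_eq_nil (by omega)]
      simp [pvE]
  | succ m ih =>
      intro hle hi c
      have hm : m < (pvCoins state).length := by omega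
      have hget : PySem.List.pyGetD (pvCoins state) ((m : Nat) : Int) 0 = (pvCoins state)[m] := by
        simp [PySem.List.pyGetD_natCast, List.getD_eq_getElem?_getD, hm]
      have htake : (pvCoins state).take (m + 1) = (pvCoins state).take m ++ [(pvCoins state)[m]] := by
        rw [List.take_add_one, List.getElem?_eq_getElem hm]
        rfl
      have hcast1 : ((m + 1 : Nat) : Int) - 1 = (m : Int) := by push_cast; ring
      rw [htake, List.reverse_append, List.reverse_singleton, List.singleton_append, hcast1]
      simp only [pvE]
      rw [ih (by omega) ((pvCoins state)[m] - 1) ((pvCoins state)[m])]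
      have hnn : 0 ≤ (pvCoins state)[m] := pvCoins_nonneg state _ (List.getElem_mem hm)
      have hif : (if ((m : Nat) : Int) > 0 then PySem.List.pyGetD (pvCoins state) (((m : Nat) : Int) - 1) 0 else -1)
          = (if 0 < m then PySem.List.pyGetD (pvCoins state) (((m : Nat) : Int) - 1) 0 else -1) := by
        by_cases h : 0 < m
        · rw [if_pos (by exact_mod_cast h), if_pos h]
        · rw [if_neg (by omega), if_neg h]
      have hG : (if (pvCoins state)[m] > 0 then
            pvGap state (pvCoins state)[m]
              (if 0 < m then PySem.List.pyGetD (pvCoins state) ((m : Int) - 1) 0 else -1)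
              ((pvCoins state)[m] - 1)
          else []) = pvG state ((m : Nat) : Int) := by
        unfold pvG
        rw [hget, hif]
        by_cases hpos : (pvCoins state)[m] > 0
        · rw [if_pos hpos]
        · have hz : (pvCoins state)[m] = 0 := by omega
          have hm0 : m = 0 := by
            by_contra hne
            have h01 : (0:Nat) < m := Nat.pos_of_ne_zero hne
            have hpair := pvCoins_pairwise state
            have := (List.pairwise_iff_getElem.mp hpair) (m-1) m (by omega) hm (by omega)
            have := pvCoins_nonneg state _ (List.getElem_mem (show m-1 < (pvCoins state).length by omega))
            omega
          rw [if_neg hpos, hz]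
          subst hm0
          unfold pvGap
          rw [if_neg (by norm_num)]
          rw [PySem.List.pyRange_neg_one_eq_nil (by omega)]
          simp
      rw [hG]
      rw [show ((m:Int)) = ((m+1 : Nat) : Int) - 1 from by push_cast; ring] at hG ⊢
      rw [PySem.List.pyRange_neg_one_cons (show (-1:Int) < ((m+1:Nat):Int) - 1 from by push_cast; omega)]
      rw [List.flatMap_cons]
      simp [List.getElem?_eq_getElem hm]


-- ===== VERDICT (by name: the statement is the Claim_ definition above) =====
theorem child_actions_spec : Claim_equal_child_actions := by
  intro state _ _
  unfold Spec_child_actions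
  unfold child_actions
  dsimp only
  have hlenA : PySem.List.len state - 1 = ((state.length : Nat) : Int) - 1 := by
    simp [PySem.List.len_eq]
  rw [hlenA, pvA_fold state state.length _ 0, pvA_E state state.length (le_refl _) 0]
  have hfilt : (pvCoins state).filter (fun j => decide (j < ((state.length : Nat) : Int))) = pvCoins state := by
    apply List.filter_eq_self.mpr
    intro j hj
    obtain ⟨k, hk, rfl, _⟩ := (pvCoins_mem state j).mp hj
    simp
    exact_mod_cast hk
  rw [hfilt, pvB_flatMap state]
  have hlenB : PySem.List.len (pvCoins state) - 1 = (((pvCoins state).length : Nat) : Int) - 1 := by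
    simp [PySem.List.len_eq]
  rw [hlenB]
  have hB := pvB_E state (pvCoins state).length (le_refl _) (((state.length : Nat) : Int) - 1) 0
  rw [if_neg (by omega), List.nil_append, List.take_length] at hB
  rw [← hB]
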